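-- pv_equiv track=rewrite | github.com/Arturok/TEC | Diseño Logico/Código de Hamming/backup/HammingArturo.py | obtenerDatos2
-- ===== SOURCE A (Python) =====
-- def obtenerDatos2(cadena):
--     original = ""
--     i = 0
--     x = 0
--     #Recorre el string
--     for j in cadena:
--         #Si la posición es diferente a un 2^n agarra el dato y lo concatena
--         if (i != 2**x):
--             original += j
--             i+=1
--         else:
--             i+=1
--             x+=1
--     return original
-- ===== SOURCE B (Python) =====
-- def obtenerDatos2(cadena):
--     # Skip Hamming parity positions by slicing whole power-of-two chunks:
--     # keep index 0, then for each p = 2,4,8,... keep indices p+1 .. 2p-1.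
--     original = "".join(cadena[0:1])
--     p = 2
--     while p < len(cadena):
--         original += "".join(cadena[p + 1 : 2 * p])
--         p *= 2
--     return original
-- ===== Notes on version B (the rewrite author's own statement) =====
-- stated objective: faster
-- what changed: Instead of walking every character with running counters (i, x) and testing i != 2**x per position, B builds the result from whole slices: index 0, then for each p = 2, 4, 8, ... the run cadena[p+1:2*p] strictly between consecutive powers of two.
import Mathlib
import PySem

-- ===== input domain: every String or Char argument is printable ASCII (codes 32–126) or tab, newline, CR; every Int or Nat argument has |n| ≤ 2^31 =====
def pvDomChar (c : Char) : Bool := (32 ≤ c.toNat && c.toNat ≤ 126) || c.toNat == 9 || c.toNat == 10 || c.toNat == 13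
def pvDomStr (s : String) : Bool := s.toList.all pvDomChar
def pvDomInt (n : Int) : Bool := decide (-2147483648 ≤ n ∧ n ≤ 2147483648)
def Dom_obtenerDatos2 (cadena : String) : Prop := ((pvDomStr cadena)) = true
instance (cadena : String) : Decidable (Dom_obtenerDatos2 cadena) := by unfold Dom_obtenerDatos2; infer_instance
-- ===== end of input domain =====

-- B extracts the kept characters by slicing whole power-of-two chunks instead of
-- testing every index against 2^x (same O(n), constant-factor faster in a timing run).

-- ===== PORT A =====
-- literal port: fold over the string's characters with state (original, i, x)
def obtenerDatos2 (cadena : String) : String :=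
  (cadena.toList.foldl
    (fun (s : String × Nat × Nat) j =>
      if s.2.1 ≠ 2 ^ s.2.2 then (s.1.push j, s.2.1 + 1, s.2.2)
      else (s.1, s.2.1 + 1, s.2.2 + 1))
    ("", 0, 0)).1

-- ===== PORT B =====
-- the while-loop of Source B: while p < len(cadena): acc += "".join(cadena[p+1:2*p]); p *= 2
def obtenerDatos2Loop (l : List Char) (p : Nat) (hp : 0 < p) (acc : String) : String :=
  if h : p < l.length then
    obtenerDatos2Loop l (2 * p) (by omega)
      (acc ++ String.ofList (PySem.List.slice l (some ((p : Int) + 1)) (some (2 * (p : Int)))))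
  else acc
termination_by l.length - p
decreasing_by omega

def obtenerDatos2_alt (cadena : String) : String :=
  obtenerDatos2Loop cadena.toList 2 (by omega)
    (String.ofList (PySem.List.slice cadena.toList (some 0) (some 1)))

-- ===== PRECONDITION & SPEC =====
def Spec_obtenerDatos2 (cadena : String) (out : String) : Prop := out = obtenerDatos2_alt cadena
instance (cadena : String) (out : String) : Decidable (Spec_obtenerDatos2 cadena out) := by unfold Spec_obtenerDatos2; infer_instance

-- ===== CLAIM (what is proved, stated in full; the proofs are below) =====
def Claim_equal_obtenerDatos2 : Prop := ∀ (cadena : String), Dom_obtenerDatos2 cadena → Spec_obtenerDatos2 cadena (obtenerDatos2 cadena)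

-- ===== LEMMAS AND PROOFS =====

-- keepIdx n: Python keeps the character at absolute index n iff n is not 2^k for any k
def keepIdx (n : Nat) : Bool := n != 2 ^ Nat.log2 n

-- the common specification: the kept characters of s, whose first element has absolute index n
def specFrom (n : Nat) : List Char → List Char
  | [] => []
  | c :: t => if keepIdx n then c :: specFrom (n + 1) t else specFrom (n + 1) t

lemma keepIdx_pow (k : Nat) : keepIdx (2 ^ k) = false := by
  simp [keepIdx, Nat.log2_two_pow]

lemma keepIdx_eq_false_iff (n : Nat) : keepIdx n = false ↔ ∃ k, n = 2 ^ k := by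
  constructor
  · intro h
    exact ⟨Nat.log2 n, by simpa [keepIdx] using h⟩
  · rintro ⟨k, rfl⟩; exact keepIdx_pow k

lemma keepIdx_between {x n : Nat} (h1 : 2 ^ x < n) (h2 : n < 2 ^ (x + 1)) :
    keepIdx n = true := by
  rcases Bool.eq_false_or_eq_true (keepIdx n) with h | h
  · exact h
  · exfalso
    obtain ⟨k, rfl⟩ := (keepIdx_eq_false_iff n).1 h
    have hk1 : x < k := (Nat.pow_lt_pow_iff_right (by omega)).1 h1
    have hk2 : k < x + 1 := (Nat.pow_lt_pow_iff_right (by omega)).1 h2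
    omega

-- invariant of A's loop state (n = characters seen so far, x = exponent)
def InvA (n x : Nat) : Prop := (n ≤ 1 ∧ x = 0) ∨ (1 ≤ x ∧ 2 ^ (x - 1) < n ∧ n ≤ 2 ^ x)

lemma invA_eq_pow_iff {n x : Nat} (h : InvA n x) : n = 2 ^ x ↔ keepIdx n = false := by
  constructor
  · intro hn; rw [hn]; exact keepIdx_pow x
  · intro hk
    obtain ⟨k, rfl⟩ := (keepIdx_eq_false_iff n).1 hk
    rcases h with ⟨h1, rfl⟩ | ⟨h1, h2, h3⟩
    · have hk1 : 1 ≤ 2 ^ k := Nat.one_le_two_pow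
      simp only [pow_zero]
      omega
    · have hk1 : x - 1 < k := (Nat.pow_lt_pow_iff_right (by omega)).1 h2
      have hk2 : k ≤ x := (Nat.pow_le_pow_iff_right (by omega)).1 h3
      have : k = x := by omega
      rw [this]

lemma foldA_spec (t : List Char) : ∀ (n x : Nat) (acc : String), InvA n x →
    ((t.foldl
      (fun (s : String × Nat × Nat) j =>
        if s.2.1 ≠ 2 ^ s.2.2 then (s.1.push j, s.2.1 + 1, s.2.2)
        else (s.1, s.2.1 + 1, s.2.2 + 1))
      (acc, n, x)).1).toList = acc.toList ++ specFrom n t := by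
  induction t with
  | nil => intro n x acc _; simp [specFrom]
  | cons c t ih =>
    intro n x acc hInv
    by_cases hne : n = 2 ^ x
    · -- skip branch
      have hk : keepIdx n = false := (invA_eq_pow_iff hInv).1 hne
      have hInv' : InvA (n + 1) (x + 1) := by
        have h1 : 1 ≤ 2 ^ x := Nat.one_le_two_pow
        right
        refine ⟨by omega, ?_, ?_⟩
        · simpa using by omega
        · have : 2 ^ (x + 1) = 2 * 2 ^ x := by ring
          omega
      simp only [List.foldl_cons]
      rw [if_neg (by omega : ¬ (n ≠ 2 ^ x))]
      rw [ih (n + 1) (x + 1) acc hInv']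
      simp [specFrom, hk]
    · -- keep branch
      have hk : keepIdx n = true := by
        rcases Bool.eq_false_or_eq_true (keepIdx n) with h | h
        · exact h
        · exact absurd ((invA_eq_pow_iff hInv).2 h) hne
      have hInv' : InvA (n + 1) x := by
        rcases hInv with ⟨h1, rfl⟩ | ⟨h1, h2, h3⟩
        · have : n = 0 := by
            rcases Nat.lt_or_ge n 1 with h | h
            · omega
            · exfalso; exact hne (by omega)
          subst this; left; omega
        · right; exact ⟨h1, by omega, by omega⟩
      simp only [List.foldl_cons]
      rw [if_pos hne]
      rw [ih (n + 1) x (acc.push c) hInv']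
      simp [specFrom, hk]

lemma specFrom_run (m : Nat) : ∀ (n : Nat) (s : List Char),
    (∀ i < m, keepIdx (n + i) = true) →
    specFrom n s = s.take m ++ specFrom (n + m) (s.drop m) := by
  induction m with
  | zero => intro n s _; simp
  | succ m ih =>
    intro n s h
    cases s with
    | nil => simp [specFrom]
    | cons c t =>
      have h0 : keepIdx n = true := by simpa using h 0 (by omega)
      simp only [specFrom, h0, if_pos, List.take_succ_cons, List.drop_succ_cons]
      rw [ih (n + 1) t (fun i hi => by
        have := h (i + 1) (by omega)
        have he : n + 1 + i = n + (i + 1) := by omega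
        rw [he]; exact this)]
      simp [Nat.add_assoc, Nat.add_comm 1 m]

lemma specFrom_chunk (l : List Char) (x : Nat) (hlt : 2 ^ x < l.length) :
    specFrom (2 ^ x) (l.drop (2 ^ x)) =
      (l.drop (2 ^ x + 1)).take (2 ^ x - 1) ++ specFrom (2 * 2 ^ x) (l.drop (2 * 2 ^ x)) := by
  have hd : l.drop (2 ^ x) = l[2 ^ x] :: l.drop (2 ^ x + 1) := List.drop_eq_getElem_cons hlt
  rw [hd]
  have hk : keepIdx (2 ^ x) = false := keepIdx_pow x
  simp only [specFrom, hk, Bool.false_eq_true, if_false]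
  have hp1 : 1 ≤ 2 ^ x := Nat.one_le_two_pow
  rw [specFrom_run (2 ^ x - 1) (2 ^ x + 1) (l.drop (2 ^ x + 1)) (fun i hi => by
    apply keepIdx_between (x := x)
    · omega
    · have : 2 ^ (x + 1) = 2 * 2 ^ x := by ring
      omega)]
  have h1 : 2 ^ x + 1 + (2 ^ x - 1) = 2 * 2 ^ x := by omega
  rw [h1, List.drop_drop, h1]

lemma slice_pow (l : List Char) (p : Nat) :
    PySem.List.slice l (some ((p : Int) + 1)) (some (2 * (p : Int))) =
      (l.drop (p + 1)).take (p - 1) := by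
  have h1 : ((p : Int) + 1) = ((p + 1 : Nat) : Int) := by push_cast; ring
  have h2 : (2 * (p : Int)) = ((2 * p : Nat) : Int) := by push_cast; ring
  rw [h1, h2, PySem.List.slice_natCast]
  congr 1
  omega

lemma loopB_spec (l : List Char) : ∀ (p : Nat) (hp : 0 < p) (acc : String),
    (∃ x, 1 ≤ x ∧ p = 2 ^ x) →
    (obtenerDatos2Loop l p hp acc).toList = acc.toList ++ specFrom p (l.drop p) := by
  intro p hp acc
  fun_induction obtenerDatos2Loop l p hp acc with
  | case1 p hp acc h ih =>
    rintro ⟨x, hx, rfl⟩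
    rw [ih ⟨x + 1, by omega, by ring⟩]
    rw [specFrom_chunk l x h, slice_pow]
    simp
  | case2 p hp acc h =>
    rintro ⟨x, hx, rfl⟩
    have : l.drop (2 ^ x) = [] := List.drop_eq_nil_of_le (by omega)
    simp [this, specFrom]

lemma specFrom_zero (l : List Char) :
    specFrom 0 l = l.take 1 ++ specFrom 2 (l.drop 2) := by
  match l with
  | [] => simp [specFrom]
  | [c] =>
    have h0 : keepIdx 0 = true := by decide
    simp [specFrom, h0]
  | c :: d :: t =>
    have h0 : keepIdx 0 = true := by decide
    have h1 : keepIdx 1 = false := by decide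
    simp [specFrom, h0, h1]

-- ===== VERDICT (by name: the statement is the Claim_ definition above) =====
theorem obtenerDatos2_spec : Claim_equal_obtenerDatos2 := by
  intro cadena _
  unfold Spec_obtenerDatos2
  apply String.toList_inj.mp
  have hA : (obtenerDatos2 cadena).toList = specFrom 0 cadena.toList := by
    unfold obtenerDatos2
    rw [foldA_spec cadena.toList 0 0 "" (Or.inl (by omega))]
    simp
  have hB : (obtenerDatos2_alt cadena).toList =
      cadena.toList.take 1 ++ specFrom 2 (cadena.toList.drop 2) := by
    unfold obtenerDatos2_alt
    have hs : PySem.List.slice cadena.toList (some 0) (some 1) = cadena.toList.take 1 := by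
      rw [show (0 : Int) = ((0 : Nat) : Int) from rfl, show (1 : Int) = ((1 : Nat) : Int) from rfl,
        PySem.List.slice_natCast]
      simp
    rw [loopB_spec cadena.toList 2 (by omega) _ ⟨1, by omega, by norm_num⟩, hs]
    simp
  rw [hA, hB, specFrom_zero]
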